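-- pv_equiv track=rewrite | github.com/Marcolol65/labs | Marco/Lab 5/доп. Задание 2.py | find_max_zeros_and_sum
-- ===== SOURCE A (Python) =====
-- def find_max_zeros_and_sum(table):
--     ind_row, ind_col = 0, 0
--     max_num_zeros = -10 ** 20
--     max_sum = -10 ** 20
--     for ind, row in enumerate(table):
--         if row.count(0) > max_num_zeros:
--             max_num_zeros, ind_row = row.count(0), ind
--     table_rev = [list(i) for i in zip(*table)]
--     for ind, col in enumerate(table_rev):
--         if sum(col) > max_sum:
--             max_sum, ind_col = sum(col), ind
--     return f'Максимально нулей в строчке: {ind_row + 1}, Максимальная сумма в столбце: {ind_col + 1}'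
-- ===== SOURCE B (Python) =====
-- def find_max_zeros_and_sum(table):
--     # Single pass over rows: track the max-zeros row and accumulate column sums
--     # on the fly (zip truncates to the shortest row), instead of transposing.
--     best_zeros, ind_row = -1, 0
--     col_sums = None
--     for ind, row in enumerate(table):
--         z = sum(1 for x in row if x == 0)
--         if z > best_zeros:
--             best_zeros, ind_row = z, ind
--         if col_sums is None:
--             col_sums = list(row)
--         else:
--             col_sums = [c + x for c, x in zip(col_sums, row)]
--     max_sum, ind_col = -10 ** 20, 0
--     for ind, s in enumerate(col_sums or []):
--         if s > max_sum:
--             max_sum, ind_col = s, ind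
--     return f'Максимально нулей в строчке: {ind_row + 1}, Максимальная сумма в столбце: {ind_col + 1}'
-- ===== Notes on version B (the rewrite author's own statement) =====
-- stated objective: alternative
-- what changed: B replaces A's explicit transpose (zip(*table)) and second row-count pass by a single loop over the rows that simultaneously tracks the max-zeros row and accumulates truncated column sums, followed by one scan of the sums.
import Mathlib
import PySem

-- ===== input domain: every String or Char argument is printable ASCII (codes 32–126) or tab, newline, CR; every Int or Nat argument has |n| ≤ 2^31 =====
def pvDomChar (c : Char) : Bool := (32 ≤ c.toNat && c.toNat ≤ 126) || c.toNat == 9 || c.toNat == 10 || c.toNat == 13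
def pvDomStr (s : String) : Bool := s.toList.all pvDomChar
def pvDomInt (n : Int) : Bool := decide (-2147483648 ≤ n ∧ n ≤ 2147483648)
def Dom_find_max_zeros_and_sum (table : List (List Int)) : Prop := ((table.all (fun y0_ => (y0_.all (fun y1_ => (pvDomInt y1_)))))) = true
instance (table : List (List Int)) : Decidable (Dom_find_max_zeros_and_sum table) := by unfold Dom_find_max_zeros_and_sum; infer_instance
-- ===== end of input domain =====

-- B replaces A's transpose (`zip(*table)`) by accumulating column sums in the same
-- single pass that tracks the max-zeros row (objective: alternative decomposition).

-- ===== PORT A =====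
-- zip(*table): truncated transpose (columns up to the shortest row), as Python's zip produces it
def pyZipStar (table : List (List Int)) : List (List Int) :=
  match table with
  | [] => []
  | r :: rs =>
      let m := rs.foldl (fun m row => min m row.length) r.length
      (List.range m).map (fun j => (r :: rs).map (fun row => row.getD j 0))

def find_max_zeros_and_sum (table : List (List Int)) : String :=
  let z := (PySem.List.enumerate table).foldl
    (fun (st : Int × Int) p =>
      if ((PySem.List.count p.2 (0 : Int) : Int) > st.1) then ((PySem.List.count p.2 (0 : Int) : Int), p.1) else st)
    (-(10 ^ 20), 0)
  let table_rev := pyZipStar table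
  let s := (PySem.List.enumerate table_rev).foldl
    (fun (st : Int × Int) p => if (p.2.sum > st.1) then (p.2.sum, p.1) else st)
    (-(10 ^ 20), 0)
  "Максимально нулей в строчке: " ++ PySem.Int.toStr (z.2 + 1) ++ ", Максимальная сумма в столбце: " ++ PySem.Int.toStr (s.2 + 1)

-- ===== PORT B =====
-- loop body of B's single pass (max-zeros tracker + incremental column sums)
def bStep (st : Int × Int × Option (List Int)) (p : Int × List Int) : Int × Int × Option (List Int) :=
  let z : Int := ((p.2.filter (fun x => x == (0 : Int))).length : Int)
  let zr := if (z > st.1) then (z, p.1) else (st.1, st.2.1)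
  let cs : Option (List Int) :=
    match st.2.2 with
    | none => some p.2
    | some cs => some (List.zipWith (· + ·) cs p.2)
  (zr.1, zr.2, cs)

def find_max_zeros_and_sum_alt (table : List (List Int)) : String :=
  let st := (PySem.List.enumerate table).foldl bStep (-1, 0, none)
  let sums := st.2.2.getD []
  let s2 := (PySem.List.enumerate sums).foldl
    (fun (st : Int × Int) p => if (p.2 > st.1) then (p.2, p.1) else st)
    (-(10 ^ 20), 0)
  "Максимально нулей в строчке: " ++ PySem.Int.toStr (st.2.1 + 1) ++ ", Максимальная сумма в столбце: " ++ PySem.Int.toStr (s2.2 + 1)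


-- ===== PRECONDITION & SPEC =====
def Spec_find_max_zeros_and_sum (table : List (List Int)) (out : String) : Prop := out = find_max_zeros_and_sum_alt table
instance (table : List (List Int)) (out : String) : Decidable (Spec_find_max_zeros_and_sum table out) := by unfold Spec_find_max_zeros_and_sum; infer_instance

-- ===== CLAIM (what is proved, stated in full; the proofs are below) =====
def Claim_equal_find_max_zeros_and_sum : Prop := ∀ (table : List (List Int)), Dom_find_max_zeros_and_sum table → Spec_find_max_zeros_and_sum table (find_max_zeros_and_sum table)

-- ===== LEMMAS AND PROOFS =====

-- abbreviations used only by the proofs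
def zStep : (Int × Int) → (Int × List Int) → (Int × Int) :=
  fun st p => if ((PySem.List.count p.2 (0 : Int) : Int) > st.1) then ((PySem.List.count p.2 (0 : Int) : Int), p.1) else st

def cStep : Option (List Int) → (Int × List Int) → Option (List Int) :=
  fun c p =>
    match c with
    | none => some p.2
    | some cs => some (List.zipWith (· + ·) cs p.2)

def sStep : (Int × Int) → (Int × Int) → (Int × Int) :=
  fun st p => if (p.2 > st.1) then (p.2, p.1) else st

lemma bStep_eq (st : Int × Int × Option (List Int)) (p : Int × List Int) :
    bStep st p = ((zStep (st.1, st.2.1) p).1, (zStep (st.1, st.2.1) p).2, cStep st.2.2 p) := by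
  have hz : ((p.2.filter (fun x => x == (0 : Int))).length : Int)
      = (PySem.List.count p.2 (0 : Int) : Int) := by
    simp [PySem.List.count_eq, List.count_eq_countP, List.countP_eq_length_filter]
  simp only [bStep, zStep, cStep, hz]

-- B's combined fold splits into the zeros fold and the column-sums fold
lemma fold_split (l : List (Int × List Int)) (s i : Int) (c : Option (List Int)) :
    l.foldl bStep (s, i, c)
      = ((l.foldl zStep (s, i)).1, (l.foldl zStep (s, i)).2, l.foldl cStep c) := by
  induction l generalizing s i c with
  | nil => rfl
  | cons p l ih =>
      simp only [List.foldl_cons, bStep_eq]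
      exact ih _ _ _

-- the second component of the zeros fold does not depend on the (negative) sentinel
lemma zeros_snd_sentinel (l : List (Int × List Int)) (s1 s2 i : Int)
    (h1 : s1 < 0) (h2 : s2 < 0) :
    (l.foldl zStep (s1, i)).2 = (l.foldl zStep (s2, i)).2 := by
  cases l with
  | nil => rfl
  | cons p l =>
      simp only [List.foldl_cons, zStep]
      have c1 : (PySem.List.count p.2 (0 : Int) : Int) > s1 :=
        lt_of_lt_of_le h1 (Int.natCast_nonneg _)
      have c2 : (PySem.List.count p.2 (0 : Int) : Int) > s2 :=
        lt_of_lt_of_le h2 (Int.natCast_nonneg _)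
      rw [if_pos c1, if_pos c2]

-- the column-sums fold ignores the enumerate index
lemma cfold_enumerate (table : List (List Int)) (i : Int) (c : Option (List Int)) :
    (PySem.List.enumerate table i).foldl cStep c
      = table.foldl (fun c row => cStep c (0, row)) c := by
  induction table generalizing i c with
  | nil => rfl
  | cons r rs ih => simp only [PySem.List.enumerate_cons, List.foldl_cons]; exact ih _ _

def colAcc (r : List Int) (rs : List (List Int)) : List Int :=
  rs.foldl (fun cs row => List.zipWith (· + ·) cs row) r

lemma cfold_some (rs : List (List Int)) (r : List Int) :
    rs.foldl (fun c row => cStep c (0, row)) (some r) = some (colAcc r rs) := by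
  induction rs generalizing r with
  | nil => rfl
  | cons r1 rs ih => simpa [cStep, colAcc] using ih (List.zipWith (· + ·) r r1)

lemma colAcc_length (r : List Int) (rs : List (List Int)) :
    (colAcc r rs).length = rs.foldl (fun m row => min m row.length) r.length := by
  induction rs generalizing r with
  | nil => rfl
  | cons r1 rs ih =>
      simp only [colAcc, List.foldl_cons] at *
      rw [ih (List.zipWith (· + ·) r r1), List.length_zipWith]

lemma colAcc_length_le (r : List Int) (rs : List (List Int)) :
    (colAcc r rs).length ≤ r.length := by
  induction rs generalizing r with
  | nil => exact le_refl _
  | cons r1 rs ih =>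
      calc (colAcc r (r1 :: rs)).length
          = (colAcc (List.zipWith (· + ·) r r1) rs).length := rfl
        _ ≤ (List.zipWith (· + ·) r r1).length := ih _
        _ ≤ r.length := by rw [List.length_zipWith]; exact min_le_left _ _

lemma colAcc_getD (r : List Int) (rs : List (List Int)) (j : Nat)
    (h : j < (colAcc r rs).length) :
    (colAcc r rs).getD j 0 = (((r :: rs).map (fun row => row.getD j 0)).sum) := by
  induction rs generalizing r with
  | nil => simp [colAcc] at h ⊢
  | cons r1 rs ih =>
      have h' : j < (colAcc (List.zipWith (· + ·) r r1) rs).length := h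
      have hz : j < (List.zipWith (· + ·) r r1).length :=
        lt_of_lt_of_le h' (colAcc_length_le _ _)
      have hr : j < r.length := lt_of_lt_of_le hz (by rw [List.length_zipWith]; exact min_le_left _ _)
      have hr1 : j < r1.length := lt_of_lt_of_le hz (by rw [List.length_zipWith]; exact min_le_right _ _)
      have step : colAcc r (r1 :: rs) = colAcc (List.zipWith (· + ·) r r1) rs := rfl
      rw [step, ih _ h']
      simp only [List.map_cons, List.sum_cons, List.getD,
        List.getElem?_eq_getElem hz, List.getElem?_eq_getElem hr, List.getElem?_eq_getElem hr1,
        List.getElem_zipWith, Option.getD_some]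
      ring

lemma colAcc_eq_map_sum (r : List Int) (rs : List (List Int)) :
    colAcc r rs = (pyZipStar (r :: rs)).map List.sum := by
  apply List.ext_getElem
  · simp [pyZipStar, colAcc_length]
  · intro j h1 h2
    rw [← List.getD_eq_getElem _ 0 h1, colAcc_getD r rs j h1]
    simp [pyZipStar]

-- the sum-selection fold over enumerated columns equals the fold over enumerated sums
lemma sfold_map_sum (cols : List (List Int)) (i : Int) (st : Int × Int) :
    (PySem.List.enumerate cols i).foldl
        (fun (st : Int × Int) p => if (p.2.sum > st.1) then (p.2.sum, p.1) else st) st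
      = (PySem.List.enumerate (cols.map List.sum) i).foldl sStep st := by
  induction cols generalizing i st with
  | nil => rfl
  | cons c cols ih =>
      simp only [List.map_cons, PySem.List.enumerate_cons, List.foldl_cons, sStep]
      exact ih _ _

-- ===== VERDICT (by name: the statement is the Claim_ definition above) =====
theorem find_max_zeros_and_sum_spec : Claim_equal_find_max_zeros_and_sum := by
  intro table _
  unfold Spec_find_max_zeros_and_sum find_max_zeros_and_sum find_max_zeros_and_sum_alt
  simp only []
  rw [show ((-1 : Int), (0 : Int), (none : Option (List Int)))
        = (((-1 : Int), (0 : Int), (none : Option (List Int))) : Int × Int × Option (List Int)) from rfl,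
      fold_split]
  have hrow : ((PySem.List.enumerate table 0).foldl zStep (-(10 ^ 20), 0)).2
      = ((PySem.List.enumerate table 0).foldl zStep (-1, 0)).2 :=
    zeros_snd_sentinel _ _ _ _ (by norm_num) (by norm_num)
  have hcols : ((PySem.List.enumerate table 0).foldl cStep none).getD []
      = (pyZipStar table).map List.sum := by
    rw [cfold_enumerate]
    cases table with
    | nil => rfl
    | cons r rs =>
        simp only [List.foldl_cons]
        rw [show cStep none (0, r) = some r from rfl, cfold_some, Option.getD_some,
          colAcc_eq_map_sum]
  rw [show (List.foldl
      (fun (st : Int × Int) p =>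
        if ((PySem.List.count p.2 (0 : Int) : Int) > st.1) then ((PySem.List.count p.2 (0 : Int) : Int), p.1) else st)
      (-(10 ^ 20), 0) (PySem.List.enumerate table)) = (PySem.List.enumerate table).foldl zStep (-(10 ^ 20), 0) from rfl]
  rw [hrow, sfold_map_sum, hcols]
  rfl
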